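-- pv_equiv track=rewrite | github.com/btlin1213/FoC-CardGame-Simulation-Project | GroupOptimal.py | colour_check
-- ===== SOURCE A (Python) =====
-- def colour_check(sort_colours, values, i):
--     while i in range(1, len(values)):
--         if (values[i] - values[i - 1]) % 2 == 0 and \
--             sort_colours[i] == sort_colours[i - 1]:
--             i += 1
--             return colour_check(sort_colours, values, i)
--         elif (values[i] - values[i - 1]) % 2 == 1 and \
--             sort_colours[i] != sort_colours[i - 1]:
--             i += 1
--             return colour_check(sort_colours, values, i)
--         else:
--             return False
--     return True
-- ===== SOURCE B (Python) =====
-- def colour_check(sort_colours, values, i):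
--     if i < 1 or i >= len(values):
--         return True
--     return all(((values[k] - values[k - 1]) % 2 == 1) == (sort_colours[k] != sort_colours[k - 1])
--                for k in range(i, len(values)))
-- ===== Notes on version B (the rewrite author's own statement) =====
-- stated objective: simpler
-- what changed: Replaced A's tail recursion with a re-dispatched while-guard by a single guard check plus an all(...) over range(i, len(values)) testing one merged parity/colour condition per adjacent pair.
-- outside the precondition, e.g. on colour_check(['a', 'a'], [0, 1, 5], 1): A returns False, B returns False
import Mathlib
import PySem

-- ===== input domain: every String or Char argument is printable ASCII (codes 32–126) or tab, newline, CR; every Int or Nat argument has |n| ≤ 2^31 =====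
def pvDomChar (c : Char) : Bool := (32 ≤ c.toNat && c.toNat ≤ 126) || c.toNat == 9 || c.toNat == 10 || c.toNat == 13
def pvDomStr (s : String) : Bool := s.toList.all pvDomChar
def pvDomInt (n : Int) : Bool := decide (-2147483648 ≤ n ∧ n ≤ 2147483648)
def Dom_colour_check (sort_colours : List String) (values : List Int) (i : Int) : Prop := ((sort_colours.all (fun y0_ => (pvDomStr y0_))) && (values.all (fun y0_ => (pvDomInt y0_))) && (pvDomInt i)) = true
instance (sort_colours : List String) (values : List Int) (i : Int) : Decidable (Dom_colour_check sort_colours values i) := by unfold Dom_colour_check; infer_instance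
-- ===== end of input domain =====

-- B replaces A's tail recursion by a guard plus an all(...) over range(i, len(values)) with one merged condition; equal on Pre_ (simpler, same cost).

-- ===== PORT A =====
-- literal transliteration of A: tail recursion, the while guard re-checked via `i in range(1, len(values))`,
-- two continue branches in A's order, else False; indexing via pyGetD (Pre_ keeps the indices in range).
def colour_check (sort_colours : List String) (values : List Int) (i : Int) : Bool :=
  if h : 1 ≤ i ∧ i < (values.length : Int) then
    if PySem.Int.mod (PySem.List.pyGetD values i 0 - PySem.List.pyGetD values (i-1) 0) 2 == 0
        && (PySem.List.pyGetD sort_colours i "" == PySem.List.pyGetD sort_colours (i-1) "") then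
      colour_check sort_colours values (i+1)
    else if PySem.Int.mod (PySem.List.pyGetD values i 0 - PySem.List.pyGetD values (i-1) 0) 2 == 1
        && !(PySem.List.pyGetD sort_colours i "" == PySem.List.pyGetD sort_colours (i-1) "") then
      colour_check sort_colours values (i+1)
    else false
  else true
termination_by ((values.length : Int) - i).toNat
decreasing_by all_goals omega

-- ===== PORT B =====
-- literal transliteration of B: early-return guard, then all(...) over range(i, len(values)).
def colour_check_alt (sort_colours : List String) (values : List Int) (i : Int) : Bool :=
  if i < 1 || (values.length : Int) ≤ i then true
  else (PySem.List.pyRange i values.length 1).all (fun k =>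
    (PySem.Int.mod (PySem.List.pyGetD values k 0 - PySem.List.pyGetD values (k-1) 0) 2 == 1)
      == (PySem.List.pyGetD sort_colours k "" != PySem.List.pyGetD sort_colours (k-1) ""))

-- ===== PRECONDITION & SPEC =====
-- Pre_ excludes the shape len(sort_colours) < len(values) with i inside [1, len(values)):
-- there the Python A may raise IndexError on sort_colours (and B raises at the same point when A does);
-- on the excluded inputs where a mismatch makes A return False first, B returns False too.
def Pre_colour_check (sort_colours : List String) (values : List Int) (i : Int) : Prop :=
  (1 ≤ i ∧ i < (values.length : Int)) → values.length ≤ sort_colours.length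
instance (sort_colours : List String) (values : List Int) (i : Int) : Decidable (Pre_colour_check sort_colours values i) := by unfold Pre_colour_check; infer_instance
def pvWitness_colour_check : List String × List Int × Int := (["red", "red", "blue"], [2, 4, 7], 1)

def Spec_colour_check (sort_colours : List String) (values : List Int) (i : Int) (out : Bool) : Prop := out = colour_check_alt sort_colours values i
instance (sort_colours : List String) (values : List Int) (i : Int) (out : Bool) : Decidable (Spec_colour_check sort_colours values i out) := by unfold Spec_colour_check; infer_instance

-- ===== CLAIM (what is proved, stated in full; the proofs are below) =====
def Claim_equal_colour_check : Prop := ∀ (sort_colours : List String) (values : List Int) (i : Int), Dom_colour_check sort_colours values i → Pre_colour_check sort_colours values i → Spec_colour_check sort_colours values i (colour_check sort_colours values i)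

-- ===== LEMMAS AND PROOFS =====

-- B's body equals the all-scan for any start index ≥ 1 (including start = len, where both are true).
theorem alt_eq_all (sort_colours : List String) (values : List Int) (i : Int) (h1 : 1 ≤ i) :
    colour_check_alt sort_colours values i
      = (PySem.List.pyRange i values.length 1).all (fun k =>
          (PySem.Int.mod (PySem.List.pyGetD values k 0 - PySem.List.pyGetD values (k-1) 0) 2 == 1)
            == (PySem.List.pyGetD sort_colours k "" != PySem.List.pyGetD sort_colours (k-1) "")) := by
  unfold colour_check_alt
  by_cases h2 : (values.length : Int) ≤ i
  · simp [h2, PySem.List.pyRange_one_eq_nil h2, show ¬ i < 1 by omega]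
  · simp [h2, show ¬ i < 1 by omega]

theorem altGuardTrue (values : List Int) (i : Int) (h : ¬ (1 ≤ i ∧ i < (values.length : Int))) :
    (i < 1 || (values.length : Int) ≤ i) = true := by
  simp; omega

theorem agree (sort_colours : List String) (values : List Int) :
    ∀ (n : Nat) (i : Int), ((values.length : Int) - i).toNat ≤ n →
      colour_check sort_colours values i = colour_check_alt sort_colours values i := by
  intro n
  induction n with
  | zero =>
    intro i hn
    have h : ¬ (1 ≤ i ∧ i < (values.length : Int)) := by omega
    unfold colour_check colour_check_alt
    rw [dif_neg h, if_pos (altGuardTrue values i h)]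
  | succ n ih =>
    intro i hn
    by_cases h : 1 ≤ i ∧ i < (values.length : Int)
    · have hcons := PySem.List.pyRange_one_cons (a := i) (b := (values.length : Int)) h.2
      have hrest : colour_check_alt sort_colours values (i+1)
          = (PySem.List.pyRange (i+1) values.length 1).all (fun k =>
              (PySem.Int.mod (PySem.List.pyGetD values k 0 - PySem.List.pyGetD values (k-1) 0) 2 == 1)
                == (PySem.List.pyGetD sort_colours k "" != PySem.List.pyGetD sort_colours (k-1) "")) :=
        alt_eq_all sort_colours values (i+1) (by omega)
      have hB : colour_check_alt sort_colours values i
          = (((PySem.Int.mod (PySem.List.pyGetD values i 0 - PySem.List.pyGetD values (i-1) 0) 2 == 1)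
                == (PySem.List.pyGetD sort_colours i "" != PySem.List.pyGetD sort_colours (i-1) ""))
             && colour_check_alt sort_colours values (i+1)) := by
        rw [alt_eq_all sort_colours values i h.1, hcons, List.all_cons, hrest]
      have hIH : colour_check sort_colours values (i+1) = colour_check_alt sort_colours values (i+1) :=
        ih (i+1) (by omega)
      rw [hB]
      unfold colour_check
      have hm2 : (PySem.List.pyGetD values i 0 - PySem.List.pyGetD values (i-1) 0) % 2 = 0 ∨
          (PySem.List.pyGetD values i 0 - PySem.List.pyGetD values (i-1) 0) % 2 = 1 := by omega
      rcases hm2 with hm | hm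
      · have hd : (2 : Int) ∣ (PySem.List.pyGetD values i 0 - PySem.List.pyGetD values (i-1) 0) := by omega
        by_cases hs : PySem.List.pyGetD sort_colours i "" = PySem.List.pyGetD sort_colours (i-1) "" <;>
          simp [h, hm, hs, hIH, hd]
      · have hd : ¬ (2 : Int) ∣ (PySem.List.pyGetD values i 0 - PySem.List.pyGetD values (i-1) 0) := by omega
        by_cases hs : PySem.List.pyGetD sort_colours i "" = PySem.List.pyGetD sort_colours (i-1) "" <;>
          simp [h, hm, hs, hIH, hd]
    · unfold colour_check colour_check_alt
      rw [dif_neg h, if_pos (altGuardTrue values i h)]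

-- ===== VERDICT (by name: the statement is the Claim_ definition above) =====
theorem colour_check_spec : Claim_equal_colour_check := by
  intro sort_colours values i _ _
  unfold Spec_colour_check
  exact agree sort_colours values ((values.length : Int) - i).toNat i (le_refl _)
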